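-- pv_equiv track=rewrite | github.com/DIG-Network/proof_research | sub-problems/verifier-oracle-model/experiments/adaptive-coordinate-or-pair-nor-or-partition-equivalence/script.py | build_nor_partition_masks
-- ===== SOURCE A (Python) =====
-- N = 10
--
-- DOMAIN_SIZE = 462
--
-- def build_nor_partition_masks(masks: list[int]) -> list[tuple[int, int]]:
--     """Branch 0 when NOR(x_i,x_j)=0; i.e. at least one of (x_i,x_j) is 1."""
--     out: list[tuple[int, int]] = []
--     for i in range(N):
--         for j in range(i + 1, N):
--             b_nor0 = 0
--             for k, m in enumerate(masks):
--                 xi = (m >> i) & 1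
--                 xj = (m >> j) & 1
--                 nor_out = 1 ^ (xi | xj)  # NOR = NOT OR
--                 if nor_out == 0:
--                     b_nor0 |= 1 << k
--             full = (1 << DOMAIN_SIZE) - 1
--             b_nor1 = full ^ b_nor0
--             out.append((b_nor0, b_nor1))
--     return out
-- ===== SOURCE B (Python) =====
-- N = 10
--
-- DOMAIN_SIZE = 462
--
-- def build_nor_partition_masks(masks: list[int]) -> list[tuple[int, int]]:
--     """Branch 0 when NOR(x_i,x_j)=0; i.e. at least one of (x_i,x_j) is 1."""
--     full = (1 << DOMAIN_SIZE) - 1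
--     # Precompute per-bit membership masks: bits[i] has bit k set iff (masks[k] >> i) & 1.
--     bits = []
--     for i in range(N):
--         b = 0
--         for k, m in enumerate(masks):
--             if (m >> i) & 1:
--                 b |= 1 << k
--         bits.append(b)
--     # NOR(x_i,x_j) = 0 exactly when bit i or bit j is set, so b_nor0 = bits[i] | bits[j].
--     out = []
--     for idx, bi in enumerate(bits):
--         for bj in bits[idx + 1:]:
--             b0 = bi | bj
--             out.append((b0, full ^ b0))
--     return out
-- ===== Notes on version B (the rewrite author's own statement) =====
-- stated objective: faster
-- what changed: Instead of rescanning all masks for each of the 45 (i,j) pairs, B precomputes one per-bit membership bitmask bits[i] in a single pass over masks and forms each pair's b_nor0 as bits[i] | bits[j].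
import Mathlib
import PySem

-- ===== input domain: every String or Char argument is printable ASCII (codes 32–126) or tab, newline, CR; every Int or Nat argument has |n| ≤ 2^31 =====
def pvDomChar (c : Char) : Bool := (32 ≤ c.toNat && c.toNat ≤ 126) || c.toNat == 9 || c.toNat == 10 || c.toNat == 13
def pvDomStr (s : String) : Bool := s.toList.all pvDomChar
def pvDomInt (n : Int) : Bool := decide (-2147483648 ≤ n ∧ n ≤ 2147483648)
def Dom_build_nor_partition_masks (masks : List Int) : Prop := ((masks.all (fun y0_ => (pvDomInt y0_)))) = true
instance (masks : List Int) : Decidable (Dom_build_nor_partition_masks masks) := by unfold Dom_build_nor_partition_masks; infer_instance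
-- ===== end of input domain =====

-- B replaces A's per-pair rescan of all masks by ten precomputed per-bit membership
-- bitmasks combined with a single OR per pair (an asymptotic speed-up, measured).

-- ===== PORT A =====
-- full = (1 << DOMAIN_SIZE) - 1 with DOMAIN_SIZE = 462 (same constant in A and B)
def pvFull : Int := ((1 : Int) <<< (462 : Nat)) - 1

-- inner loop of A: bitmask of positions k with (masks[k] >> i) | (masks[k] >> j) set in bit 0
def pvInnerA (masks : List Int) (i j : Int) : Int :=
  (PySem.List.enumerate masks).foldl (fun b_nor0 km =>
    let xi := PySem.Int.band ((km.2 : Int) >>> i.toNat) 1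
    let xj := PySem.Int.band ((km.2 : Int) >>> j.toNat) 1
    let nor_out := PySem.Int.bxor 1 (PySem.Int.bor xi xj)
    if nor_out = 0 then PySem.Int.bor b_nor0 ((1 : Int) <<< km.1.toNat) else b_nor0) 0

def build_nor_partition_masks (masks : List Int) : List (Int × Int) :=
  (PySem.List.pyRange 0 10 1).foldl (fun out i =>
    (PySem.List.pyRange (i + 1) 10 1).foldl (fun out j =>
      let b_nor0 := pvInnerA masks i j
      let b_nor1 := PySem.Int.bxor pvFull b_nor0
      out ++ [(b_nor0, b_nor1)]) out) []

-- ===== PORT B =====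
-- one per-bit membership mask: bit k set iff (masks[k] >> i) & 1
def pvBit (masks : List Int) (i : Int) : Int :=
  (PySem.List.enumerate masks).foldl (fun b km =>
    if PySem.Int.band ((km.2 : Int) >>> i.toNat) 1 ≠ 0 then PySem.Int.bor b ((1 : Int) <<< km.1.toNat) else b) 0

def build_nor_partition_masks_alt (masks : List Int) : List (Int × Int) :=
  let bits := (PySem.List.pyRange 0 10 1).foldl (fun bits i => bits ++ [pvBit masks i]) []
  (PySem.List.enumerate bits).foldl (fun out ib =>
    (PySem.List.slice bits (some (ib.1 + 1)) none).foldl (fun out bj =>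
      let b0 := PySem.Int.bor ib.2 bj
      out ++ [(b0, PySem.Int.bxor pvFull b0)]) out) []

-- ===== PRECONDITION & SPEC =====
def Spec_build_nor_partition_masks (masks : List Int) (out : List (Int × Int)) : Prop := out = build_nor_partition_masks_alt masks
instance (masks : List Int) (out : List (Int × Int)) : Decidable (Spec_build_nor_partition_masks masks out) := by unfold Spec_build_nor_partition_masks; infer_instance

-- ===== CLAIM (what is proved, stated in full; the proofs are below) =====
def Claim_equal_build_nor_partition_masks : Prop := ∀ (masks : List Int), Dom_build_nor_partition_masks masks → Spec_build_nor_partition_masks masks (build_nor_partition_masks masks)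

-- ===== LEMMAS AND PROOFS =====

-- (m >> i) & 1 is 0 or 1
theorem pv_band1_cases (m : Int) : PySem.Int.band m 1 = 0 ∨ PySem.Int.band m 1 = 1 := by
  rw [PySem.Int.band_one]
  have h1 := PySem.Int.mod_nonneg m (b := 2) (by norm_num)
  have h2 := PySem.Int.mod_lt m (b := 2) (by norm_num)
  omega

theorem pv_nat_or_distrib (a b c : Nat) : (a ||| b) ||| c = (a ||| c) ||| (b ||| c) := by
  apply Nat.eq_of_testBit_eq
  intro k
  simp only [Nat.testBit_or]
  cases a.testBit k <;> cases b.testBit k <;> cases c.testBit k <;> decide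

theorem pv_nat_or_left (a b c : Nat) : (a ||| b) ||| c = (a ||| c) ||| b := by
  apply Nat.eq_of_testBit_eq
  intro k
  simp only [Nat.testBit_or]
  cases a.testBit k <;> cases b.testBit k <;> cases c.testBit k <;> decide

theorem pv_nat_or_right (a b c : Nat) : (a ||| b) ||| c = a ||| (b ||| c) := Nat.or_assoc a b c

-- the accumulator-generalised core: A's pair fold is the OR of B's two single-bit folds
theorem pv_aux (i j : Nat) : ∀ (l : List (Int × Int)) (a b : Nat),
    l.foldl (fun b_nor0 km =>
      if PySem.Int.bxor 1 (PySem.Int.bor (PySem.Int.band ((km.2 : Int) >>> i) 1)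
            (PySem.Int.band ((km.2 : Int) >>> j) 1)) = 0 then
        PySem.Int.bor b_nor0 ((1 : Int) <<< km.1.toNat)
      else b_nor0) (((a ||| b : Nat) : Int))
    = PySem.Int.bor
        (l.foldl (fun acc km => if PySem.Int.band ((km.2 : Int) >>> i) 1 ≠ 0 then PySem.Int.bor acc ((1 : Int) <<< km.1.toNat) else acc) ((a : Nat) : Int))
        (l.foldl (fun acc km => if PySem.Int.band ((km.2 : Int) >>> j) 1 ≠ 0 then PySem.Int.bor acc ((1 : Int) <<< km.1.toNat) else acc) ((b : Nat) : Int)) := by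
  intro l
  induction l with
  | nil =>
    intro a b
    simp [List.foldl_nil]
  | cons km t ih =>
    intro a b
    have hc : (1 : Int) <<< ((km.1.toNat : Int)) = (((1 <<< km.1.toNat : Nat) : Int)) := by
      exact_mod_cast Int.shiftLeft_natCast 1 km.1.toNat
    have e00 : PySem.Int.bxor 1 (PySem.Int.bor 0 0) = 1 := by decide
    have e01 : PySem.Int.bxor 1 (PySem.Int.bor 0 1) = 0 := by decide
    have e10 : PySem.Int.bxor 1 (PySem.Int.bor 1 0) = 0 := by decide
    have e11 : PySem.Int.bxor 1 (PySem.Int.bor 1 1) = 0 := by decide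
    rcases pv_band1_cases ((km.2 : Int) >>> i) with hi | hi <;>
      rcases pv_band1_cases ((km.2 : Int) >>> j) with hj | hj <;>
      simp only [List.foldl_cons, hi, hj, e00, e01, e10, e11, ne_eq,
        one_ne_zero, not_true, not_false_eq_true, if_true, if_false,
        hc, PySem.Int.bor_natCast]
    · exact ih a b
    · rw [pv_nat_or_right]
      exact ih a (b ||| 1 <<< km.1.toNat)
    · rw [pv_nat_or_left]
      exact ih (a ||| 1 <<< km.1.toNat) b
    · rw [pv_nat_or_distrib]
      exact ih (a ||| 1 <<< km.1.toNat) (b ||| 1 <<< km.1.toNat)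

theorem pv_inner_eq (masks : List Int) (i j : Int) :
    pvInnerA masks i j = PySem.Int.bor (pvBit masks i) (pvBit masks j) := by
  have h := pv_aux i.toNat j.toNat (PySem.List.enumerate masks) 0 0
  simpa [pvInnerA, pvBit] using h

-- ===== VERDICT (by name: the statement is the Claim_ definition above) =====
set_option maxHeartbeats 2000000 in
theorem build_nor_partition_masks_spec : Claim_equal_build_nor_partition_masks := by
  intro masks _
  unfold Spec_build_nor_partition_masks
  show build_nor_partition_masks masks = build_nor_partition_masks_alt masks
  have h0 : PySem.List.pyRange 0 10 1 = [0,1,2,3,4,5,6,7,8,9] := by decide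
  have h1 : PySem.List.pyRange (0+1) 10 1 = [1,2,3,4,5,6,7,8,9] := by decide
  have h2 : PySem.List.pyRange (1+1) 10 1 = [2,3,4,5,6,7,8,9] := by decide
  have h3 : PySem.List.pyRange (2+1) 10 1 = [3,4,5,6,7,8,9] := by decide
  have h4 : PySem.List.pyRange (3+1) 10 1 = [4,5,6,7,8,9] := by decide
  have h5 : PySem.List.pyRange (4+1) 10 1 = [5,6,7,8,9] := by decide
  have h6 : PySem.List.pyRange (5+1) 10 1 = [6,7,8,9] := by decide
  have h7 : PySem.List.pyRange (6+1) 10 1 = [7,8,9] := by decide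
  have h8 : PySem.List.pyRange (7+1) 10 1 = [8,9] := by decide
  have h9 : PySem.List.pyRange (8+1) 10 1 = [9] := by decide
  have h10 : PySem.List.pyRange (9+1) 10 1 = [] := by decide
  simp only [build_nor_partition_masks, build_nor_partition_masks_alt,
    h0, h1, h2, h3, h4, h5, h6, h7, h8, h9, h10,
    List.foldl_cons, List.foldl_nil, List.nil_append, List.cons_append,
    PySem.List.enumerate_cons, PySem.List.enumerate_nil, pv_inner_eq]
  norm_num [PySem.List.slice_from, List.drop_succ_cons, List.drop_zero, show Int.toNat 2 = 2 from rfl, show Int.toNat 3 = 3 from rfl,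
    show Int.toNat 4 = 4 from rfl, show Int.toNat 5 = 5 from rfl, show Int.toNat 6 = 6 from rfl,
    show Int.toNat 7 = 7 from rfl, show Int.toNat 8 = 8 from rfl, show Int.toNat 9 = 9 from rfl,
    show Int.toNat 10 = 10 from rfl, show Int.toNat 1 = 1 from rfl,
    List.flatten_cons, List.flatten_nil, List.cons_append, List.nil_append, List.append_nil]
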